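-- pv_equiv track=rewrite | github.com/Thilton729/pdf_extractor | src/pdf_extractor/pdf_backends.py | _address_start_candidates
-- ===== SOURCE A (Python) =====
-- def _address_start_candidates(text: str) -> list[tuple[int, int]]:
--     candidates: list[tuple[int, int]] = []
--     for start, char in enumerate(text):
--         if not char.isdigit():
--             continue
--
--         end = start
--         while end < len(text) and text[end].isdigit() and (end - start) < 5:
--             end += 1
--
--         if end == len(text):
--             continue
--         if not text[end].isalpha():
--             continue
--
--         digit_len = end - start
--         if 1 <= digit_len <= 5 and start > 6:
--             candidates.append((start, digit_len))
--
--     return candidates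
-- ===== SOURCE B (Python) =====
-- def _address_start_candidates(text: str) -> list[tuple[int, int]]:
--     out: list[tuple[int, int]] = []
--     n = len(text)
--     i = 0
--     while i < n:
--         if text[i].isdigit():
--             j = i
--             while j < n and text[j].isdigit():
--                 j += 1
--             if j < n and text[j].isalpha():
--                 run_len = j - i
--                 for k in range(max(0, run_len - 5), run_len):
--                     if i + k > 6:
--                         out.append((i + k, run_len - k))
--             i = j
--         else:
--             i += 1
--     return out
-- ===== Notes on version B (the rewrite author's own statement) =====
-- stated objective: alternative
-- what changed: B scans the text once for maximal digit runs and emits each run's qualifying suffix positions arithmetically, instead of A's per-character bounded rescan of up to 5 digits at every digit position.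
import Mathlib
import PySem

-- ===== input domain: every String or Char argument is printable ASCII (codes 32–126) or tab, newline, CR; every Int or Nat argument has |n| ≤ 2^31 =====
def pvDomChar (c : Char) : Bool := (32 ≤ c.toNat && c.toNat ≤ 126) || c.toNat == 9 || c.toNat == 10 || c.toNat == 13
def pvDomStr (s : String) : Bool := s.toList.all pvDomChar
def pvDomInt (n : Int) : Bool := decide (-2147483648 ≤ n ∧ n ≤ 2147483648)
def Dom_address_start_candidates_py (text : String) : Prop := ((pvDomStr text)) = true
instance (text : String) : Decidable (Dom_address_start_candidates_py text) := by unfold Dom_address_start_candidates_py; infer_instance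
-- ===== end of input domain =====

-- B replaces A's per-character bounded rescan by a single left-to-right scan over maximal digit runs,
-- emitting each run's qualifying suffix positions arithmetically (objective: alternative decomposition).

-- ===== PORT A =====
-- the inner `while end < len(text) and text[end].isdigit() and (end - start) < 5` loop
def pvAWhile (l : List Char) (start e : Nat) : Nat :=
  if h : e < l.length ∧ PySem.Chars.isdigit (l.getD e ' ') = true ∧ e - start < 5 then
    pvAWhile l start (e + 1)
  else e
termination_by l.length - e
decreasing_by omega

def address_start_candidates_py (text : String) : List (Int × Int) :=
  let l := text.toList
  (PySem.List.enumerate l).foldl (fun acc p =>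
    if PySem.Chars.isdigit p.2 = false then acc
    else
      let e := pvAWhile l p.1.toNat p.1.toNat
      if e = l.length then acc
      else if PySem.Chars.isalpha (l.getD e ' ') = false then acc
      else
        let dl := e - p.1.toNat
        if 1 ≤ dl ∧ dl ≤ 5 ∧ 6 < p.1 then acc ++ [(p.1, (dl : Int))] else acc) []

-- ===== PORT B =====
-- the inner `while j < n and text[j].isdigit()` loop of Source B
def pvBRun (l : List Char) (j : Nat) : Nat :=
  if h : j < l.length ∧ PySem.Chars.isdigit (l.getD j ' ') = true then pvBRun l (j + 1)
  else j
termination_by l.length - j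
decreasing_by omega

-- needed by pvBLoop's termination proof
theorem pvBRun_ge (l : List Char) (j : Nat) : j ≤ pvBRun l j := by
  induction j using pvBRun.induct (l := l) with
  | case1 j h ih => rw [pvBRun, dif_pos h]; omega
  | case2 j h => rw [pvBRun, dif_neg h]

-- the outer `while i < n` loop of Source B, with the run-suffix `for k in range(...)` emission
def pvBLoop (l : List Char) (i : Nat) (acc : List (Int × Int)) : List (Int × Int) :=
  if hi : i < l.length then
    if hd : PySem.Chars.isdigit (l.getD i ' ') = true then
      let j := pvBRun l i
      let L : Int := ((j - i : Nat) : Int)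
      let acc' :=
        if j < l.length ∧ PySem.Chars.isalpha (l.getD j ' ') = true then
          (PySem.List.pyRange (max 0 (L - 5)) L 1).foldl
            (fun a k => if 6 < (i : Int) + k then a ++ [((i : Int) + k, L - k)] else a) acc
        else acc
      pvBLoop l j acc'
    else pvBLoop l (i + 1) acc
  else acc
termination_by l.length - i
decreasing_by
  · have h1 := pvBRun_ge l (i + 1)
    have h2 : pvBRun l i = pvBRun l (i + 1) := by rw [pvBRun, dif_pos ⟨hi, hd⟩]
    omega
  · omega

def address_start_candidates_py_alt (text : String) : List (Int × Int) :=
  pvBLoop text.toList 0 []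

-- ===== PRECONDITION & SPEC =====
def Spec_address_start_candidates_py (text : String) (out : List (Int × Int)) : Prop := out = address_start_candidates_py_alt text
instance (text : String) (out : List (Int × Int)) : Decidable (Spec_address_start_candidates_py text out) := by unfold Spec_address_start_candidates_py; infer_instance

-- ===== CLAIM (what is proved, stated in full; the proofs are below) =====
def Claim_equal_address_start_candidates_py : Prop := ∀ (text : String), Dom_address_start_candidates_py text → Spec_address_start_candidates_py text (address_start_candidates_py text)

-- ===== LEMMAS AND PROOFS =====

-- the common characterisation: position s yields a candidate iff its maximal digit run ends
-- within 5 characters at an index m < n holding a letter, and s > 6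
def pvF (l : List Char) (s : Nat) : Option (Int × Int) :=
  let m := pvBRun l s
  if PySem.Chars.isdigit (l.getD s ' ') = true ∧ m < l.length ∧ m - s ≤ 5 ∧
      PySem.Chars.isalpha (l.getD m ' ') = true ∧ 6 < s then
    some ((s : Int), ((m - s : Nat) : Int))
  else none

theorem pvBRun_le (l : List Char) (j : Nat) (h : j ≤ l.length) : pvBRun l j ≤ l.length := by
  induction j using pvBRun.induct (l := l) with
  | case1 j hc ih => rw [pvBRun, dif_pos hc]; exact ih (by omega)
  | case2 j hc => rw [pvBRun, dif_neg hc]; omega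

theorem pvBRun_digit (l : List Char) (j : Nat) :
    ∀ e, j ≤ e → e < pvBRun l j → PySem.Chars.isdigit (l.getD e ' ') = true := by
  induction j using pvBRun.induct (l := l) with
  | case1 j hc ih =>
    intro e h1 h2
    rcases Nat.eq_or_lt_of_le h1 with rfl | h1'
    · exact hc.2
    · rw [pvBRun, dif_pos hc] at h2
      exact ih e h1' h2
  | case2 j hc =>
    intro e h1 h2
    rw [pvBRun, dif_neg hc] at h2; omega

theorem pvBRun_stable (l : List Char) (j : Nat) :
    ∀ s, j ≤ s → s ≤ pvBRun l j → pvBRun l s = pvBRun l j := by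
  induction j using pvBRun.induct (l := l) with
  | case1 j hc ih =>
    intro s h1 h2
    rcases Nat.eq_or_lt_of_le h1 with rfl | h1'
    · rfl
    · have hj : pvBRun l j = pvBRun l (j + 1) := by rw [pvBRun, dif_pos hc]
      rw [hj] at h2 ⊢
      exact ih s h1' h2
  | case2 j hc =>
    intro s h1 h2
    rw [pvBRun, dif_neg hc] at h2
    have : s = j := by omega
    subst this; rw [pvBRun, dif_neg hc]

theorem pvBRun_gt (l : List Char) (j : Nat) (h1 : j < l.length)
    (h2 : PySem.Chars.isdigit (l.getD j ' ') = true) : j < pvBRun l j := by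
  have h3 : pvBRun l j = pvBRun l (j + 1) := by rw [pvBRun, dif_pos ⟨h1, h2⟩]
  have := pvBRun_ge l (j + 1)
  omega

theorem digit_not_alpha (c : Char) (h : PySem.Chars.isdigit c = true) :
    PySem.Chars.isalpha c = false := by
  simp only [PySem.Chars.isdigit, Bool.and_eq_true, decide_eq_true_eq] at h
  simp only [PySem.Chars.isalpha, PySem.Chars.isupper, PySem.Chars.islower, Bool.or_eq_false_iff,
    Bool.and_eq_false_iff, decide_eq_false_iff_not, not_le]
  obtain ⟨h1, h2⟩ := h
  rw [Char.le_def] at h1 h2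
  constructor
  · left; rw [Char.lt_def]; exact UInt32.lt_of_le_of_lt h2 (by decide)
  · left; rw [Char.lt_def]; exact UInt32.lt_of_le_of_lt h2 (by decide)

theorem pvAWhile_eq (l : List Char) (start : Nat) :
    ∀ e, start ≤ e → e ≤ start + 5 → pvAWhile l start e = min (pvBRun l e) (start + 5) := by
  intro e
  induction e using pvAWhile.induct (l := l) (start := start) with
  | case1 e hc ih =>
    intro h1 h2
    rw [pvAWhile, dif_pos hc]
    have hr : pvBRun l e = pvBRun l (e + 1) := by rw [pvBRun, dif_pos ⟨hc.1, hc.2.1⟩]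
    rw [hr]
    exact ih (by omega) (by omega)
  | case2 e hc =>
    intro h1 h2
    rw [pvAWhile, dif_neg hc]
    by_cases hb : e < l.length ∧ PySem.Chars.isdigit (l.getD e ' ') = true
    · have h5 : e - start ≥ 5 := by
        by_contra h
        exact hc ⟨hb.1, hb.2, by omega⟩
      have he : e = start + 5 := by omega
      have := pvBRun_ge l e
      omega
    · have hr : pvBRun l e = e := by rw [pvBRun, dif_neg hb]
      rw [hr]; omega

theorem foldl_append_toList {α β : Type} (g : α → Option β) (l : List α) (acc : List β) :
    l.foldl (fun a x => a ++ (g x).toList) acc = acc ++ l.filterMap g := by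
  induction l generalizing acc with
  | nil => simp
  | cons x xs ih => cases h : g x <;> simp [h, ih]

theorem foldl_append_opt {β : Type} (P : Int → Prop) [DecidablePred P] (f : Int → β) (l : List Int) (acc : List β) :
    l.foldl (fun a k => if P k then a ++ [f k] else a) acc
      = acc ++ l.filterMap (fun k => if P k then some (f k) else none) := by
  induction l generalizing acc with
  | nil => simp
  | cons x xs ih => by_cases h : P x <;> simp [h, ih]

theorem pvBlock_eq (l : List Char) (i : Nat) (acc : List (Int × Int))
    (hi : i < l.length) (hd : PySem.Chars.isdigit (l.getD i ' ') = true) :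
    (if pvBRun l i < l.length ∧ PySem.Chars.isalpha (l.getD (pvBRun l i) ' ') = true then
      (PySem.List.pyRange (max 0 (((pvBRun l i - i : Nat) : Int) - 5)) ((pvBRun l i - i : Nat) : Int) 1).foldl
        (fun a k => if 6 < (i : Int) + k then a ++ [((i : Int) + k, ((pvBRun l i - i : Nat) : Int) - k)] else a) acc
     else acc)
      = acc ++ (List.range' i (pvBRun l i - i)).filterMap (pvF l) := by
  have hij : i < pvBRun l i := pvBRun_gt l i hi hd
  have hjn : pvBRun l i ≤ l.length := pvBRun_le l i (le_of_lt hi)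
  set j := pvBRun l i with hj
  have hmem : ∀ s, i ≤ s → s < j → pvBRun l s = j ∧ PySem.Chars.isdigit (l.getD s ' ') = true := by
    intro s h1 h2
    exact ⟨pvBRun_stable l i s h1 (le_of_lt h2), pvBRun_digit l i s h1 h2⟩
  by_cases hg : j < l.length ∧ PySem.Chars.isalpha (l.getD j ' ') = true
  · rw [if_pos hg]
    set Ln := j - i with hLn
    set a' := Ln - min Ln 5 with ha'
    have hcast : max 0 ((Ln : Int) - 5) = (a' : Int) := by omega
    rw [foldl_append_opt]
    congr 1
    have hsplit : List.range' i Ln = List.range' i a' ++ List.range' (i + a') (Ln - a') := by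
      have h0 := List.range'_append (s := i) (m := a') (n := Ln - a') (step := 1)
      simp only [one_mul] at h0
      exact ((congrArg (List.range' i) (by omega : Ln = a' + (Ln - a'))).trans h0.symm)
    rw [hsplit, List.filterMap_append]
    have hnil : (List.range' i a').filterMap (pvF l) = [] := by
      rw [List.filterMap_eq_nil_iff]
      intro s hs
      rw [List.mem_range'] at hs
      obtain ⟨u, hu, rfl⟩ := hs
      obtain ⟨hr, hdig⟩ := hmem (i + 1 * u) (by omega) (by omega)
      simp only [pvF, hr]
      rw [if_neg]
      intro hh
      have := hh.2.2.1
      omega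
    rw [hnil, List.nil_append]
    rw [hcast, PySem.List.pyRange_one]
    have hlen : (((Ln : Int)) - (a' : Int)).toNat = Ln - a' := by omega
    rw [hlen]
    rw [List.range'_eq_map_range, List.filterMap_map, List.filterMap_map]
    apply List.filterMap_congr
    intro u hu
    rw [List.mem_range] at hu
    obtain ⟨hr, hdig⟩ := hmem (i + a' + u) (by omega) (by omega)
    simp only [Function.comp_apply]
    have hle : j - (i + a' + u) ≤ 5 := by omega
    have h6 : (6 < (i : Int) + ((a' : Int) + (u : Int))) ↔ 6 < i + a' + u := by omega
    by_cases h7 : 6 < i + a' + u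
    · rw [if_pos (h6.mpr h7)]
      have hv : pvF l (i + a' + u) = some (((i + a' + u : Nat) : Int), ((j - (i + a' + u) : Nat) : Int)) := by
        simp only [pvF, hr]
        rw [if_pos ⟨hdig, hg.1, hle, hg.2, h7⟩]
      rw [hv]
      simp only [Option.some.injEq, Prod.mk.injEq]
      omega
    · rw [if_neg (fun hh => h7 (h6.mp hh))]
      have hv : pvF l (i + a' + u) = none := by
        simp only [pvF, hr]
        exact if_neg (fun hh => h7 hh.2.2.2.2)
      rw [hv]
  · rw [if_neg hg]
    have hnil : (List.range' i (j - i)).filterMap (pvF l) = [] := by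
      rw [List.filterMap_eq_nil_iff]
      intro s hs
      rw [List.mem_range'] at hs
      obtain ⟨u, hu, rfl⟩ := hs
      obtain ⟨hr, hdig⟩ := hmem (i + 1 * u) (by omega) (by omega)
      simp only [pvF, hr]
      rw [if_neg]
      intro hh
      exact hg ⟨hh.2.1, hh.2.2.2.1⟩
    rw [hnil, List.append_nil]

theorem B_eq (l : List Char) :
    ∀ i acc, i ≤ l.length →
      pvBLoop l i acc = acc ++ (List.range' i (l.length - i)).filterMap (pvF l) := by
  intro i acc
  induction i, acc using pvBLoop.induct (l := l) with
  | case1 i acc hi hd j L acc' ih =>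
    intro _
    have hij : i < pvBRun l i := pvBRun_gt l i hi hd
    have hjn : pvBRun l i ≤ l.length := pvBRun_le l i (le_of_lt hi)
    rw [pvBLoop, dif_pos hi, dif_pos hd]
    show pvBLoop l j acc' = _
    rw [ih hjn]
    have hacc : acc' = acc ++ (List.range' i (pvBRun l i - i)).filterMap (pvF l) :=
      pvBlock_eq l i acc hi hd
    rw [hacc]
    rw [List.append_assoc, ← List.filterMap_append]
    congr 2
    have h0 := List.range'_append (s := i) (m := pvBRun l i - i) (n := l.length - pvBRun l i) (step := 1)
    simp only [one_mul] at h0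
    have h1 : i + (pvBRun l i - i) = pvBRun l i := by omega
    rw [h1] at h0
    rw [h0]
    congr 1
    omega
  | case2 i acc hi hd ih =>
    intro _
    rw [pvBLoop, dif_pos hi, dif_neg hd]
    rw [ih hi]
    have h1 : l.length - i = (l.length - (i + 1)) + 1 := by omega
    rw [h1, List.range'_succ, List.filterMap_cons]
    have h2 : pvF l i = none := by
      simp only [pvF]
      exact if_neg (fun hh => hd hh.1)
    rw [h2]
  | case3 i acc hi =>
    intro hle
    have : l.length - i = 0 := by omega
    rw [pvBLoop, dif_neg hi, this]
    simp

theorem enum_filterMap {α β : Type} (xs : List α) (s : Nat) (h : Nat → Option β) :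
    (PySem.List.enumerate xs (s : Int)).filterMap (fun p => h p.1.toNat)
      = (List.range' s xs.length).filterMap h := by
  induction xs generalizing s with
  | nil => simp [PySem.List.enumerate]
  | cons x xs ih =>
    rw [PySem.List.enumerate_cons, List.filterMap_cons, List.length_cons, List.range'_succ,
      List.filterMap_cons]
    have h1 : ((s : Int) + 1) = ((s + 1 : Nat) : Int) := by push_cast; ring
    rw [h1, ih]
    simp

theorem body_eq (l : List Char) (acc : List (Int × Int)) (k : Nat) (hk : k < l.length) :
    (if PySem.Chars.isdigit (l[k]) = false then acc
     else
       let e := pvAWhile l ((k : Int)).toNat ((k : Int)).toNat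
       if e = l.length then acc
       else if PySem.Chars.isalpha (l.getD e ' ') = false then acc
       else
         let dl := e - ((k : Int)).toNat
         if 1 ≤ dl ∧ dl ≤ 5 ∧ 6 < ((k : Int)) then acc ++ [(((k : Int)), (dl : Int))] else acc)
      = acc ++ (pvF l k).toList := by
  have htn : ((k : Int)).toNat = k := Int.toNat_natCast k
  have hgd : l.getD k ' ' = l[k] := List.getD_eq_getElem l ' ' hk
  rw [htn]
  by_cases hd : PySem.Chars.isdigit (l[k]) = true
  · rw [if_neg (by simp [hd])]
    have hd' : PySem.Chars.isdigit (l.getD k ' ') = true := by rw [hgd]; exact hd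
    have hm : k < pvBRun l k := pvBRun_gt l k hk hd'
    have hmn : pvBRun l k ≤ l.length := pvBRun_le l k (le_of_lt hk)
    have he : pvAWhile l k k = min (pvBRun l k) (k + 5) := pvAWhile_eq l k k le_rfl (by omega)
    by_cases hcap : pvBRun l k ≤ k + 5
    · have he' : pvAWhile l k k = pvBRun l k := by omega
      simp only [he']
      by_cases hn : pvBRun l k = l.length
      · rw [if_pos hn]
        have : pvF l k = none := by
          simp only [pvF]
          refine if_neg (fun hh => ?_)
          omega
        rw [this]; simp
      · rw [if_neg hn]
        by_cases ha : PySem.Chars.isalpha (l.getD (pvBRun l k) ' ') = true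
        · rw [if_neg (by rw [ha]; simp)]
          by_cases h6 : 6 < k
          · rw [if_pos ⟨by omega, by omega, by exact_mod_cast h6⟩]
            have : pvF l k = some ((k : Int), ((pvBRun l k - k : Nat) : Int)) := by
              simp only [pvF]
              exact if_pos ⟨hd', by omega, by omega, ha, h6⟩
            rw [this]; simp
          · rw [if_neg (fun hh => h6 (by exact_mod_cast hh.2.2))]
            have : pvF l k = none := by
              simp only [pvF]
              exact if_neg (fun hh => h6 hh.2.2.2.2)
            rw [this]; simp
        · rw [if_pos (by simpa using ha)]
          have : pvF l k = none := by
            simp only [pvF]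
            exact if_neg (fun hh => ha hh.2.2.2.1)
          rw [this]; simp
    · have he' : pvAWhile l k k = k + 5 := by omega
      simp only [he']
      have hdig5 : PySem.Chars.isdigit (l.getD (k + 5) ' ') = true :=
        pvBRun_digit l k (k + 5) (by omega) (by omega)
      have ha5 : PySem.Chars.isalpha (l.getD (k + 5) ' ') = false := by
        rcases List.getD_eq_getElem l ' ' (show k + 5 < l.length by omega) with h
        exact digit_not_alpha _ hdig5
      rw [if_neg (by omega), if_pos ha5]
      have : pvF l k = none := by
        simp only [pvF]
        refine if_neg (fun hh => ?_)
        omega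
      rw [this]; simp
  · rw [if_pos (by simpa using hd)]
    have : pvF l k = none := by
      simp only [pvF]
      refine if_neg (fun hh => ?_)
      rw [hgd] at hh
      exact hd hh.1
    rw [this]; simp

theorem A_eq (text : String) :
    address_start_candidates_py text = (List.range text.toList.length).filterMap (pvF text.toList) := by
  unfold address_start_candidates_py
  set l := text.toList with hl
  rw [PySem.List.foldl_congr_mem _ _
    (fun acc p => acc ++ (pvF l p.1.toNat).toList) _ ?_]
  · rw [foldl_append_toList, List.nil_append]
    have h0 : (0 : Int) = ((0 : Nat) : Int) := rfl
    rw [h0, enum_filterMap, List.range_eq_range']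
  · intro acc p hp
    rw [PySem.List.mem_enumerate_iff] at hp
    obtain ⟨k, hk, rfl⟩ := hp
    have h1 : ((0 : Int) + k) = (k : Int) := by ring
    simp only [h1, Int.toNat_natCast]
    have := body_eq l acc k hk
    rw [Int.toNat_natCast] at this
    exact this

-- ===== VERDICT (by name: the statement is the Claim_ definition above) =====
theorem address_start_candidates_py_spec : Claim_equal_address_start_candidates_py := by
  intro text _
  unfold Spec_address_start_candidates_py address_start_candidates_py_alt
  rw [B_eq text.toList 0 [] (by omega), A_eq text]
  simp [List.range_eq_range']
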